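-- pv_equiv track=rewrite | github.com/isaiahadams7/quickhandleads | google_search.py | build_reddit_subreddits
-- ===== SOURCE A (Python) =====
-- from typing import List, Dict, Optional, Set, Tuple
--
-- US_STATES = {
--     "AL": "Alabama",
--     "AK": "Alaska",
--     "AZ": "Arizona",
--     "AR": "Arkansas",
--     "CA": "California",
--     "CO": "Colorado",
--     "CT": "Connecticut",
--     "DE": "Delaware",
--     "FL": "Florida",
--     "GA": "Georgia",
--     "HI": "Hawaii",
--     "ID": "Idaho",
--     "IL": "Illinois",
--     "IN": "Indiana",
--     "IA": "Iowa",
--     "KS": "Kansas",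
--     "KY": "Kentucky",
--     "LA": "Louisiana",
--     "ME": "Maine",
--     "MD": "Maryland",
--     "MA": "Massachusetts",
--     "MI": "Michigan",
--     "MN": "Minnesota",
--     "MS": "Mississippi",
--     "MO": "Missouri",
--     "MT": "Montana",
--     "NE": "Nebraska",
--     "NV": "Nevada",
--     "NH": "New Hampshire",
--     "NJ": "New Jersey",
--     "NM": "New Mexico",
--     "NY": "New York",
--     "NC": "North Carolina",
--     "ND": "North Dakota",
--     "OH": "Ohio",
--     "OK": "Oklahoma",
--     "OR": "Oregon",
--     "PA": "Pennsylvania",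
--     "RI": "Rhode Island",
--     "SC": "South Carolina",
--     "SD": "South Dakota",
--     "TN": "Tennessee",
--     "TX": "Texas",
--     "UT": "Utah",
--     "VT": "Vermont",
--     "VA": "Virginia",
--     "WA": "Washington",
--     "WV": "West Virginia",
--     "WI": "Wisconsin",
--     "WY": "Wyoming"
-- }
--
-- def build_reddit_subreddits(locations: List[str], max_subs: int = 12) -> List[str]:
--     subs: List[str] = []
--     for loc in locations:
--         cleaned = loc.replace(",", " ").strip()
--         parts = [p for p in cleaned.split() if p]
--         if not parts:
--             continue
--         state_token = parts[-1].upper()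
--         city_tokens = parts[:-1]
--         if state_token in US_STATES:
--             state_name = US_STATES[state_token].lower().replace(" ", "")
--             subs.append(state_name)
--         else:
--             city_tokens = parts
--
--         if city_tokens:
--             city = "".join(city_tokens).lower()
--             subs.append(city)
--
--         if len(subs) >= max_subs:
--             break
--
--     # De-dup while preserving order
--     seen = set()
--     unique = []
--     for sub in subs:
--         if sub not in seen:
--             seen.add(sub)
--             unique.append(sub)
--     return unique[:max_subs]
-- ===== SOURCE B (Python) =====
-- from itertools import accumulate
-- from typing import List
--
-- US_STATES = {
--     "AL": "Alabama", "AK": "Alaska", "AZ": "Arizona", "AR": "Arkansas",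
--     "CA": "California", "CO": "Colorado", "CT": "Connecticut", "DE": "Delaware",
--     "FL": "Florida", "GA": "Georgia", "HI": "Hawaii", "ID": "Idaho",
--     "IL": "Illinois", "IN": "Indiana", "IA": "Iowa", "KS": "Kansas",
--     "KY": "Kentucky", "LA": "Louisiana", "ME": "Maine", "MD": "Maryland",
--     "MA": "Massachusetts", "MI": "Michigan", "MN": "Minnesota", "MS": "Mississippi",
--     "MO": "Missouri", "MT": "Montana", "NE": "Nebraska", "NV": "Nevada",
--     "NH": "New Hampshire", "NJ": "New Jersey", "NM": "New Mexico", "NY": "New York",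
--     "NC": "North Carolina", "ND": "North Dakota", "OH": "Ohio", "OK": "Oklahoma",
--     "OR": "Oregon", "PA": "Pennsylvania", "RI": "Rhode Island", "SC": "South Carolina",
--     "SD": "South Dakota", "TN": "Tennessee", "TX": "Texas", "UT": "Utah",
--     "VT": "Vermont", "VA": "Virginia", "WA": "Washington", "WV": "West Virginia",
--     "WI": "Wisconsin", "WY": "Wyoming"
-- }
--
-- def _subreddits_for(loc: str) -> List[str]:
--     """Subreddit names suggested by one location string."""
--     parts = loc.replace(",", " ").strip().split()
--     if not parts:
--         return []
--     names = []
--     st = parts[-1].upper()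
--     if st in US_STATES:
--         names.append(US_STATES[st].lower().replace(" ", ""))
--         parts = parts[:-1]
--     if parts:
--         names.append("".join(parts).lower())
--     return names
--
-- def build_reddit_subreddits(locations: List[str], max_subs: int = 12) -> List[str]:
--     # Declarative pipeline: group names per location, cut the group list where the
--     # running total of gathered names first reaches max_subs, flatten, dedup, slice.
--     groups = [g for g in map(_subreddits_for, locations) if g]
--     totals = list(accumulate(map(len, groups)))
--     keep = next((i + 1 for i, t in enumerate(totals) if t >= max_subs), len(groups))
--     pool = [name for g in groups[:keep] for name in g]
--     return list(dict.fromkeys(pool))[:max_subs]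
-- ===== Notes on version B (the rewrite author's own statement) =====
-- stated objective: alternative
-- what changed: A runs an imperative loop that appends into one growing subs list with a mid-loop break and then a second manual seen-set dedup loop; B is a staged declarative pipeline: per-location name groups, a prefix-sum (itertools.accumulate) cut index over the group list, a flatten comprehension, dict.fromkeys dedup and a slice.
import Mathlib
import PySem

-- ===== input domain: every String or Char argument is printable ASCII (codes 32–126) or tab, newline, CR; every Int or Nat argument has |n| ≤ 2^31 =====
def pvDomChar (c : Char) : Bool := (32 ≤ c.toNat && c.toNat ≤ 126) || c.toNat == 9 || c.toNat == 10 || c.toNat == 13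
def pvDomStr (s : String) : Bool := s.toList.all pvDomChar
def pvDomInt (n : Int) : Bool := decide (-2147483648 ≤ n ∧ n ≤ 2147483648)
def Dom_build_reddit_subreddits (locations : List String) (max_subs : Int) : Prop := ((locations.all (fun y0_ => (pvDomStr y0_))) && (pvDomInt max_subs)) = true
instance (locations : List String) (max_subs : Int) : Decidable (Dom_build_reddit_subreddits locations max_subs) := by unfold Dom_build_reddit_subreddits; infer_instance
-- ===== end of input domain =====

-- B replaces A's imperative append-with-break loop plus manual dedup loop by a staged pipeline
-- (per-location groups, prefix-sum cut index, flatten, dict.fromkeys dedup, slice); same return value.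

-- module constant US_STATES (shared data, as in the Python module)
def US_STATES_dict : PySem.Dict String String := PySem.Dict.ofList
  [("AL","Alabama"),("AK","Alaska"),("AZ","Arizona"),("AR","Arkansas"),
   ("CA","California"),("CO","Colorado"),("CT","Connecticut"),("DE","Delaware"),
   ("FL","Florida"),("GA","Georgia"),("HI","Hawaii"),("ID","Idaho"),
   ("IL","Illinois"),("IN","Indiana"),("IA","Iowa"),("KS","Kansas"),
   ("KY","Kentucky"),("LA","Louisiana"),("ME","Maine"),("MD","Maryland"),
   ("MA","Massachusetts"),("MI","Michigan"),("MN","Minnesota"),("MS","Mississippi"),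
   ("MO","Missouri"),("MT","Montana"),("NE","Nebraska"),("NV","Nevada"),
   ("NH","New Hampshire"),("NJ","New Jersey"),("NM","New Mexico"),("NY","New York"),
   ("NC","North Carolina"),("ND","North Dakota"),("OH","Ohio"),("OK","Oklahoma"),
   ("OR","Oregon"),("PA","Pennsylvania"),("RI","Rhode Island"),("SC","South Carolina"),
   ("SD","South Dakota"),("TN","Tennessee"),("TX","Texas"),("UT","Utah"),
   ("VT","Vermont"),("VA","Virginia"),("WA","Washington"),("WV","West Virginia"),
   ("WI","Wisconsin"),("WY","Wyoming")]

-- ===== PORT A =====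
-- A's first loop: build the raw subs list, breaking when len(subs) >= max_subs
def buildA (m : Int) : List String → List String → List String
  | [], subs => subs
  | loc :: rest, subs =>
    let cleaned := PySem.Str.strip (PySem.Str.replace loc "," " ")
    let parts := (PySem.Str.split₀ cleaned).filter (fun p => !(p == ""))
    match parts with
    | [] => buildA m rest subs  -- continue
    | p0 :: ps =>
      let state_token := PySem.Str.upper ((p0 :: ps).getLast (by simp))  -- parts[-1], nonempty here
      let sc :=  -- (subs after the state append, city_tokens)
        if US_STATES_dict.contains state_token then
          (subs ++ [PySem.Str.replace (PySem.Str.lower (US_STATES_dict.getD state_token "")) " " ""],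
           PySem.List.slice (p0 :: ps) none (some (-1)))
        else (subs, p0 :: ps)
      let subs2 := if sc.2.isEmpty then sc.1 else sc.1 ++ [PySem.Str.lower (PySem.Str.join "" sc.2)]
      if m ≤ (subs2.length : Int) then subs2 else buildA m rest subs2

-- A's second loop: de-dup preserving order
def dedupA : List String → PySem.Set String → List String → List String
  | [], _, uniq => uniq
  | s :: rest, seen, uniq =>
    if PySem.Set.contains seen s then dedupA rest seen uniq
    else dedupA rest (PySem.Set.add seen s) (uniq ++ [s])

def build_reddit_subreddits (locations : List String) (max_subs : Int) : List String :=
  PySem.List.slice (dedupA (buildA max_subs locations []) PySem.Set.empty []) none (some max_subs)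

-- ===== PORT B =====
-- Source B _subreddits_for: the subreddit names suggested by one location string
def subredditsFor (loc : String) : List String :=
  let parts := PySem.Str.split₀ (PySem.Str.strip (PySem.Str.replace loc "," " "))
  match parts with
  | [] => []
  | p0 :: ps =>
    let st := PySem.Str.upper ((p0 :: ps).getLast (by simp))
    let np :=  -- (names after the state branch, remaining parts)
      if US_STATES_dict.contains st then
        ([PySem.Str.replace (PySem.Str.lower (US_STATES_dict.getD st "")) " " ""],
         PySem.List.slice (p0 :: ps) none (some (-1)))
      else ([], p0 :: ps)
    np.1 ++ (if np.2.isEmpty then [] else [PySem.Str.lower (PySem.Str.join "" np.2)])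

-- Source B: itertools.accumulate(map(len, groups)) — running totals, no initial element
def accumB (c : Int) : List Int → List Int
  | [] => []
  | x :: xs => (c + x) :: accumB (c + x) xs

def build_reddit_subreddits_alt (locations : List String) (max_subs : Int) : List String :=
  let groups := (locations.map subredditsFor).filter (fun g => !g.isEmpty)
  let totals := accumB 0 (groups.map (fun g => (g.length : Int)))
  let keep := match totals.findIdx? (fun t => decide (max_subs ≤ t)) with
              | some i => i + 1
              | none => groups.length
  let pool := (groups.take keep).flatten
  PySem.List.slice (PySem.List.dedup pool) none (some max_subs)

-- ===== PRECONDITION & SPEC =====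
def Spec_build_reddit_subreddits (locations : List String) (max_subs : Int) (out : List String) : Prop := out = build_reddit_subreddits_alt locations max_subs
instance (locations : List String) (max_subs : Int) (out : List String) : Decidable (Spec_build_reddit_subreddits locations max_subs out) := by unfold Spec_build_reddit_subreddits; infer_instance

-- ===== CLAIM (what is proved, stated in full; the proofs are below) =====
def Claim_equal_build_reddit_subreddits : Prop := ∀ (locations : List String) (max_subs : Int), Dom_build_reddit_subreddits locations max_subs → Spec_build_reddit_subreddits locations max_subs (build_reddit_subreddits locations max_subs)

-- ===== LEMMAS AND PROOFS =====

-- chunks produced by split() are never empty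
theorem split₀_go_ne_nil (s : List Char) : ∀ (cur : List Char) (acc : List (List Char)),
    (∀ x ∈ acc, x ≠ []) → ∀ x ∈ PySem.Chars.split₀.go s cur acc, x ≠ [] := by
  induction s with
  | nil =>
    intro cur acc hacc x hx
    simp only [PySem.Chars.split₀.go] at hx
    split at hx
    · exact hacc x (List.mem_reverse.mp hx)
    · rename_i hcur
      rw [List.mem_reverse, List.mem_cons] at hx
      rcases hx with h | h
      · subst h
        simp only [List.isEmpty_iff] at hcur
        simpa using hcur
      · exact hacc x h
  | cons c rest ih =>
    intro cur acc hacc x hx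
    simp only [PySem.Chars.split₀.go] at hx
    split at hx
    · split at hx
      · exact ih [] acc hacc x hx
      · rename_i hcur
        refine ih [] (cur.reverse :: acc) ?_ x hx
        intro y hy
        rcases List.mem_cons.mp hy with h | h
        · subst h
          simp only [List.isEmpty_iff] at hcur
          simpa using hcur
        · exact hacc y h
    · exact ih (c :: cur) acc hacc x hx

theorem filter_split₀ (s : String) :
    (PySem.Str.split₀ s).filter (fun p => !(p == "")) = PySem.Str.split₀ s := by
  rw [List.filter_eq_self]
  intro p hp
  simp only [PySem.Str.split₀, List.mem_map] at hp
  obtain ⟨cs, hcs, rfl⟩ := hp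
  have hne : cs ≠ [] := split₀_go_ne_nil _ [] [] (by simp) cs hcs
  rw [Bool.not_eq_true', beq_eq_false_iff_ne]
  intro h
  apply hne
  have := congrArg String.toList h
  simpa using this

-- A's loop body appends exactly B's name group for the location
theorem buildA_cons (m : Int) (loc : String) (rest subs : List String) :
    buildA m (loc :: rest) subs =
      if (subredditsFor loc).isEmpty then buildA m rest subs
      else if m ≤ ((subs ++ subredditsFor loc).length : Int) then subs ++ subredditsFor loc
      else buildA m rest (subs ++ subredditsFor loc) := by
  have hf := filter_split₀ (PySem.Str.strip (PySem.Str.replace loc "," " "))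
  cases hp : PySem.Str.split₀ (PySem.Str.strip (PySem.Str.replace loc "," " ")) with
  | nil =>
    rw [hp] at hf
    simp only [buildA, subredditsFor, hp, hf]; simp
  | cons p0 ps =>
    rw [hp] at hf
    simp only [buildA, subredditsFor, hp, hf]
    clear hf hp
    split_ifs <;> simp_all <;> omega

-- the raw suffix A still appends, given current raw count c (proof-only helper)
def tailRaw (m : Int) : List String → Int → List String
  | [], _ => []
  | loc :: rest, c =>
    let cs := subredditsFor loc
    if cs.isEmpty then tailRaw m rest c
    else if m ≤ c + (cs.length : Int) then cs
    else cs ++ tailRaw m rest (c + (cs.length : Int))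

theorem buildA_eq_tailRaw (m : Int) : ∀ (rest subs : List String),
    buildA m rest subs = subs ++ tailRaw m rest (subs.length : Int) := by
  intro rest
  induction rest with
  | nil => intro subs; simp [buildA, tailRaw]
  | cons loc rest ih =>
    intro subs
    rw [buildA_cons]
    simp only [tailRaw]
    generalize subredditsFor loc = cs
    by_cases hc : cs.isEmpty
    · simp [hc, ih]
    · by_cases hb : m ≤ (subs.length : Int) + (cs.length : Int)
      · simp [hc, hb]
      · simp [hc, hb, ih (subs ++ cs)]

-- group-level version of tailRaw (over the nonempty groups only)
def tailG (m : Int) : List (List String) → Int → List String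
  | [], _ => []
  | g :: rest, c =>
    if m ≤ c + (g.length : Int) then g
    else g ++ tailG m rest (c + (g.length : Int))

theorem tailRaw_eq_tailG (m : Int) : ∀ (locs : List String) (c : Int),
    tailRaw m locs c = tailG m ((locs.map subredditsFor).filter (fun g => !g.isEmpty)) c := by
  intro locs
  induction locs with
  | nil => intro c; simp [tailRaw, tailG]
  | cons loc rest ih =>
    intro c
    simp only [tailRaw, List.map_cons, List.filter_cons]
    by_cases hc : (subredditsFor loc).isEmpty
    · simp [hc, ih]
    · have he : (subredditsFor loc).isEmpty = false := by simpa using hc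
      rw [he]
      simp only [Bool.not_false, if_true, Bool.false_eq_true, if_false, tailG]
      by_cases hb : m ≤ c + ((subredditsFor loc).length : Int)
      · rw [if_pos hb, if_pos hb]
      · rw [if_neg hb, if_neg hb, ih]

-- the cut index computed by B's findIdx?-over-accumulate matches tailG
theorem tailG_eq_take (m : Int) : ∀ (gs : List (List String)) (c : Int),
    tailG m gs c =
      (gs.take (match (accumB c (gs.map (fun g => (g.length : Int)))).findIdx?
                  (fun t => decide (m ≤ t)) with
                | some i => i + 1
                | none => gs.length)).flatten := by
  intro gs
  induction gs with
  | nil => intro c; simp [tailG, accumB]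
  | cons g rest ih =>
    intro c
    simp only [tailG, List.map_cons, accumB, List.findIdx?_cons]
    by_cases hb : m ≤ c + (g.length : Int)
    · simp [hb]
    · simp only [hb, decide_false, if_neg, Bool.false_eq_true, not_false_eq_true]
      rw [ih (c + (g.length : Int))]
      cases (accumB (c + (g.length : Int)) (rest.map (fun g => (g.length : Int)))).findIdx?
          (fun t => decide (m ≤ t)) with
      | none => simp
      | some i => simp

-- A's manual dedup loop keeps seen and uniq equal as lists, and equals folding Set.add
theorem dedupA_eq_foldl : ∀ (xs u : List String),
    dedupA xs u u = xs.foldl PySem.Set.add u := by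
  intro xs
  induction xs with
  | nil => intro u; simp [dedupA]
  | cons s rest ih =>
    intro u
    by_cases h : PySem.Set.contains u s <;>
      simp [dedupA, PySem.Set.add, PySem.Set.contains, ih] <;>
      simp [PySem.Set.contains] at h <;> simp [h, ih]

-- ===== VERDICT (by name: the statement is the Claim_ definition above) =====
theorem build_reddit_subreddits_spec : Claim_equal_build_reddit_subreddits := by
  intro locations max_subs _
  unfold Spec_build_reddit_subreddits build_reddit_subreddits build_reddit_subreddits_alt
  rw [buildA_eq_tailRaw]
  simp only [List.nil_append, List.length_nil, Nat.cast_zero]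
  rw [tailRaw_eq_tailG, tailG_eq_take]
  rw [show (PySem.Set.empty : PySem.Set String) = ([] : List String) from rfl]
  rw [dedupA_eq_foldl]
  rw [PySem.List.dedup_eq_ofList, PySem.Set.ofList_eq_foldl]
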